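-- pv_equiv track=rewrite | github.com/stingram/Simple-Problems | hackerrank/minimalHeaviestSetA/minimalHeaviestSetA.py | minimalHeaviestSetA
-- ===== SOURCE A (Python) =====
-- def minimalHeaviestSetA(arr):
--     A = []
--     arr.sort(reverse=True)
--     L=0
--     R=len(arr)
--     A_curr=0
--     B_curr=0
--     while L<R:
--         A_curr += arr[L]
--         A.append(arr[L])
--         while B_curr < A_curr and R > L:
--             R -= 1
--             B_curr += arr[R]
--         # We broke the constraint so we need
--         # to make it valid before starting the
--         # loop again
--         B_curr -= arr[R]
--         R += 1
--         L+=1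
--
--     return A[::-1]
-- ===== SOURCE B (Python) =====
-- def minimalHeaviestSetA(arr):
--     arr.sort(reverse=True)
--     total = sum(arr)
--     s = 0
--     res = []
--     for x in arr:
--         s += x
--         res.append(x)
--         if s > total - s:
--             break
--     return res[::-1]
-- ===== Notes on version B (the rewrite author's own statement) =====
-- stated objective: simpler
-- what changed: Replaces A's dual-pointer sweep (backward suffix accumulator with an undo step each outer iteration) by a single forward pass that precomputes the total once and breaks as soon as the running prefix sum exceeds the rest.
import Mathlib
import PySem

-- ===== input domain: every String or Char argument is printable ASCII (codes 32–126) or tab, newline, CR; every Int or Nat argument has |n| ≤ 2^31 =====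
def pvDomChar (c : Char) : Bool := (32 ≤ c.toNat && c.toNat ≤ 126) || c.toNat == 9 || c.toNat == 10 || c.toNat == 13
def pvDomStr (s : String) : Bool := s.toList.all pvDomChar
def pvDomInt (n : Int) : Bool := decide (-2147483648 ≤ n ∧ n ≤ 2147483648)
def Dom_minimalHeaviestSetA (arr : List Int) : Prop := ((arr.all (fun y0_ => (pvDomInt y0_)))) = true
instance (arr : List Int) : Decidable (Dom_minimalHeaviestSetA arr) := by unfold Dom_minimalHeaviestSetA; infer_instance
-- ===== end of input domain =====

-- B replaces A's dual-pointer sweep by a precomputed total and one forward pass (simpler, same cost).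
-- Both Pythons sort `arr` in place (same mutation); the equivalence proved here is about the return value.

-- ===== PORT A =====
-- inner `while B_curr < A_curr and R > L: R -= 1; B_curr += arr[R]`
def pvInner (xs : List Int) (L : Nat) (Ac : Int) (R : Nat) (Bc : Int) : Nat × Int :=
  if h : Bc < Ac ∧ L < R then pvInner xs L Ac (R - 1) (Bc + xs.getD (R - 1) 0) else (R, Bc)
termination_by R
decreasing_by omega

-- outer `while L < R` loop; fuel bounds the iteration count (L increases each round, L < R ≤ len)
def pvOuter (xs : List Int) (fuel L R : Nat) (Ac Bc : Int) (acc : List Int) : List Int :=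
  match fuel with
  | 0 => acc.reverse
  | f + 1 =>
    if L < R then
      let x := xs.getD L 0
      let p := pvInner xs L (Ac + x) R Bc
      if p.1 < xs.length then
        pvOuter xs f (L + 1) (p.1 + 1) (Ac + x) (p.2 - xs.getD p.1 0) (acc ++ [x])
      else (acc ++ [x]).reverse  -- Python raises IndexError (arr[R] with R = len) here; excluded by Pre_
    else acc.reverse

def minimalHeaviestSetA (arr : List Int) : List Int :=
  let xs := PySem.List.sorted arr (fun x => x) true
  pvOuter xs (xs.length + 1) 0 xs.length 0 0 []

-- ===== PORT B =====
def pvAltGo (total : Int) (l : List Int) (s : Int) (res : List Int) : List Int :=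
  match l with
  | [] => res
  | x :: t =>
    if s + x > total - (s + x) then res ++ [x] else pvAltGo total t (s + x) (res ++ [x])

def minimalHeaviestSetA_alt (arr : List Int) : List Int :=
  let xs := PySem.List.sorted arr (fun x => x) true
  (pvAltGo xs.sum xs 0 []).reverse

-- ===== PRECONDITION & SPEC =====
-- Pre_ excludes exactly the inputs on which A raises IndexError: a non-empty list with no positive element
def Pre_minimalHeaviestSetA (arr : List Int) : Prop := arr = [] ∨ ∃ x ∈ arr, 0 < x
instance (arr : List Int) : Decidable (Pre_minimalHeaviestSetA arr) := by
  unfold Pre_minimalHeaviestSetA; infer_instance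
def pvWitness_minimalHeaviestSetA : List Int := [1]

def Spec_minimalHeaviestSetA (arr : List Int) (out : List Int) : Prop := out = minimalHeaviestSetA_alt arr
instance (arr : List Int) (out : List Int) : Decidable (Spec_minimalHeaviestSetA arr out) := by
  unfold Spec_minimalHeaviestSetA; infer_instance

-- ===== CLAIM (what is proved, stated in full; the proofs are below) =====
def Claim_equal_minimalHeaviestSetA : Prop := ∀ (arr : List Int), Dom_minimalHeaviestSetA arr → Pre_minimalHeaviestSetA arr → Spec_minimalHeaviestSetA arr (minimalHeaviestSetA arr)
-- ===== LEMMAS AND PROOFS =====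
-- prefix sum S and suffix sum T of the sorted list
def pvS (xs : List Int) (i : Nat) : Int := (xs.take i).sum
def pvT (xs : List Int) (i : Nat) : Int := (xs.drop i).sum

theorem pvT_succ (xs : List Int) (i : Nat) (h : i < xs.length) :
    pvT xs i = xs[i] + pvT xs (i + 1) := by
  unfold pvT
  rw [List.drop_eq_getElem_cons h, List.sum_cons]

theorem pvS_succ (xs : List Int) (i : Nat) (h : i < xs.length) :
    pvS xs (i + 1) = pvS xs i + xs[i] := by
  unfold pvS
  rw [List.take_succ, List.sum_append, List.getElem?_eq_getElem h]
  simp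

theorem pvTake_succ (xs : List Int) (i : Nat) (h : i < xs.length) :
    xs.take (i + 1) = xs.take i ++ [xs[i]] := by
  rw [List.take_succ, List.getElem?_eq_getElem h]
  rfl

theorem pvST_total (xs : List Int) (i : Nat) : pvS xs i + pvT xs i = xs.sum := by
  unfold pvS pvT
  exact List.sum_take_add_sum_drop xs i

theorem pv_mono (xs : List Int) (hs : xs.Pairwise (fun a b : Int => b ≤ a))
    (p q : Nat) (hpq : p ≤ q) (hq : q < xs.length) : xs[q] ≤ xs[p]'(lt_of_le_of_lt hpq hq) := by
  rcases Nat.lt_or_ge p q with h | h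
  · exact (List.pairwise_iff_getElem.mp hs) p q _ hq h
  · have : p = q := le_antisymm hpq h
    subst this; rfl

-- once a negative element appears at index t, every later suffix sum is ≤ 0
theorem pv_sum_nonpos : ∀ l : List Int, (∀ x ∈ l, x ≤ 0) → l.sum ≤ 0
  | [], _ => le_refl 0
  | x :: t, h => by
    have h1 := h x (List.mem_cons_self ..)
    have h2 := pv_sum_nonpos t (fun y hy => h y (List.mem_cons_of_mem _ hy))
    simp only [List.sum_cons]
    omega

theorem pv_sum_nonneg : ∀ l : List Int, (∀ x ∈ l, 0 ≤ x) → 0 ≤ l.sum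
  | [], _ => le_refl 0
  | x :: t, h => by
    have h1 := h x (List.mem_cons_self ..)
    have h2 := pv_sum_nonneg t (fun y hy => h y (List.mem_cons_of_mem _ hy))
    simp only [List.sum_cons]
    omega

theorem pv_neg_tail (xs : List Int) (hs : xs.Pairwise (fun a b : Int => b ≤ a))
    (t : Nat) (ht : t < xs.length) (hneg : xs[t] < 0) (j : Nat) (hj : t ≤ j) :
    pvT xs j ≤ 0 := by
  unfold pvT
  apply pv_sum_nonpos
  intro x hx
  obtain ⟨k, hk, rfl⟩ := List.getElem_of_mem hx
  rw [List.getElem_drop]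
  have hlt : j + k < xs.length := by
    have := hk
    simp only [List.length_drop] at this
    omega
  have := pv_mono xs hs t (j + k) (by omega) hlt
  omega

-- key monotonicity: if the prefix already outweighs its own suffix (and is positive),
-- every later suffix also stays below it
theorem pv_claimM (xs : List Int) (hs : xs.Pairwise (fun a b : Int => b ≤ a))
    (i j : Nat) (hij : i ≤ j) (hjn : j ≤ xs.length)
    (hpos : 0 < pvS xs i) (hTi : pvT xs i < pvS xs i) : pvT xs j < pvS xs i := by
  by_cases hall : ∀ u, i ≤ u → (h : u < j) → 0 ≤ xs[u]'(lt_of_lt_of_le h hjn)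
  · -- all elements between i and j are nonnegative: T j ≤ T i
    have hsplit : pvT xs i = ((xs.drop i).take (j - i)).sum + pvT xs j := by
      have hji : i + (j - i) = j := by omega
      unfold pvT
      rw [← List.sum_take_add_sum_drop (xs.drop i) (j - i), List.drop_drop, hji]
    have hnn : 0 ≤ ((xs.drop i).take (j - i)).sum := by
      apply pv_sum_nonneg
      intro x hx
      obtain ⟨k, hk, rfl⟩ := List.getElem_of_mem hx
      have hkji : k < j - i := by
        have := hk
        simp only [List.length_take, List.length_drop] at this
        omega
      have hkd : k < (xs.drop i).length := by
        simp only [List.length_drop]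
        omega
      rw [List.getElem_take, List.getElem_drop]
      exact hall (i + k) (by omega) (by omega)
    omega
  · push_neg at hall
    obtain ⟨u, hu1, hu2, hu3⟩ := hall
    have := pv_neg_tail xs hs u (lt_of_lt_of_le hu2 hjn) hu3 j (by omega)
    omega

theorem pvInner_all (xs : List Int) (L : Nat) (A : Int) :
    ∀ R, L ≤ R → R ≤ xs.length → (∀ j, L < j → j ≤ R → pvT xs j < A) →
    pvInner xs L A R (pvT xs R) = (L, pvT xs L) := by
  intro R
  induction R using Nat.strong_induction_on with
  | _ R ih =>
    intro h1 h2 hall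
    rw [pvInner]
    by_cases hLR : L < R
    · have hTR : pvT xs R < A := hall R hLR (le_refl R)
      rw [dif_pos ⟨hTR, hLR⟩]
      have hgd : xs.getD (R - 1) 0 = xs[R - 1]'(by omega) := List.getD_eq_getElem xs 0 (by omega)
      have hT : pvT xs R + xs.getD (R - 1) 0 = pvT xs (R - 1) := by
        have h := pvT_succ xs (R - 1) (by omega)
        have hR1 : R - 1 + 1 = R := by omega
        rw [hR1] at h
        rw [hgd]
        omega
      rw [hT]
      exact ih (R - 1) (by omega) (by omega) (by omega)
        (fun j hj1 hj2 => hall j hj1 (by omega))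
    · have hLeq : L = R := by omega
      rw [dif_neg (by exact fun hc => hLR hc.2)]
      rw [hLeq]

theorem pvInner_stop (xs : List Int) (L : Nat) (A : Int) (r : Nat) (hLr : L < r) :
    ∀ R, r ≤ R → R ≤ xs.length → A ≤ pvT xs r → (∀ j, r < j → j ≤ R → pvT xs j < A) →
    pvInner xs L A R (pvT xs R) = (r, pvT xs r) := by
  intro R
  induction R using Nat.strong_induction_on with
  | _ R ih =>
    intro h1 h2 hP hmax
    rw [pvInner]
    by_cases hrR : r < R
    · have hTR : pvT xs R < A := hmax R hrR (le_refl R)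
      rw [dif_pos ⟨hTR, by omega⟩]
      have hgd : xs.getD (R - 1) 0 = xs[R - 1]'(by omega) := List.getD_eq_getElem xs 0 (by omega)
      have hT : pvT xs R + xs.getD (R - 1) 0 = pvT xs (R - 1) := by
        have h := pvT_succ xs (R - 1) (by omega)
        have hR1 : R - 1 + 1 = R := by omega
        rw [hR1] at h
        rw [hgd]
        omega
      rw [hT]
      exact ih (R - 1) (by omega) (by omega) (by omega) hP
        (fun j hj1 hj2 => hmax j hj1 (by omega))
    · have hreq : r = R := by omega
      rw [dif_neg (by
        rintro ⟨hc, -⟩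
        rw [← hreq] at hc
        omega)]
      rw [hreq]

theorem pvOuter_refl (xs : List Int) (fuel L : Nat) (Ac Bc : Int) (acc : List Int) :
    pvOuter xs fuel L L Ac Bc acc = acc.reverse := by
  cases fuel <;> simp [pvOuter]

theorem pvOuter_eq (xs : List Int) (hs : xs.Pairwise (fun a b : Int => b ≤ a)) :
    ∀ fuel L R : Nat, L < R → R ≤ xs.length → R - L < fuel →
    0 < pvS xs (L + 1) →
    (∀ j, R ≤ j → j ≤ xs.length → pvT xs j < pvS xs (L + 1)) →
    pvOuter xs fuel L R (pvS xs L) (pvT xs R) (xs.take L)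
      = (pvAltGo xs.sum (xs.drop L) (pvS xs L) (xs.take L)).reverse := by
  intro fuel
  induction fuel with
  | zero => intro L R h1 _ h3 _ _; omega
  | succ f ih =>
    intro L R hLR hRn hfuel hpos hinv
    have hLn : L < xs.length := by omega
    have hgd : xs.getD L 0 = xs[L] := List.getD_eq_getElem xs 0 hLn
    have hS1 : pvS xs (L + 1) = pvS xs L + xs[L] := pvS_succ xs L hLn
    have htk : xs.take L ++ [xs[L]] = xs.take (L + 1) := (pvTake_succ xs L hLn).symm
    have hdrop : xs.drop L = xs[L] :: xs.drop (L + 1) := List.drop_eq_getElem_cons hLn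
    have htot : pvS xs (L + 1) + pvT xs (L + 1) = xs.sum := pvST_total xs (L + 1)
    rw [pvOuter]
    simp only [if_pos hLR, hgd]
    rw [hdrop, pvAltGo]
    by_cases hbr : pvT xs (L + 1) < pvS xs (L + 1)
    · -- A's sweep reaches L (exit); B breaks here
      have hall : ∀ j, L < j → j ≤ R → pvT xs j < pvS xs (L + 1) := fun j hj1 hj2 =>
        pv_claimM xs hs (L + 1) j (by omega) (by omega) hpos hbr
      rw [← hS1, pvInner_all xs L (pvS xs (L + 1)) R (by omega) hRn hall]
      dsimp only
      rw [if_pos hLn, pvOuter_refl,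
        if_pos (show pvS xs (L + 1) > xs.sum - pvS xs (L + 1) by omega), htk]
    · -- B continues; A's sweep stops at the greatest r ≤ R with pvS (L+1) ≤ pvT r
      have hcont : pvS xs (L + 1) ≤ pvT xs (L + 1) := by omega
      set P : Nat → Prop := fun j => pvS xs (L + 1) ≤ pvT xs j ∧ L < j with hPdef
      have hPdec : DecidablePred P := fun j => by rw [hPdef]; infer_instance
      set r := Nat.findGreatest P R with hrdef
      have hP1 : P (L + 1) := ⟨hcont, by omega⟩
      have hLe : L + 1 ≤ r := Nat.le_findGreatest (by omega) hP1
      have hle2 : r ≤ R := Nat.findGreatest_le R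
      have hPr : P r := Nat.findGreatest_spec (m := L + 1) (by omega) hP1
      have hmax : ∀ j, r < j → j ≤ R → pvT xs j < pvS xs (L + 1) := by
        intro j hj1 hj2
        have hnotP := Nat.findGreatest_is_greatest hj1 hj2
        by_contra hc
        exact hnotP ⟨Int.not_lt.mp hc, by omega⟩
      have hrR : r < R := by
        rcases eq_or_lt_of_le hle2 with heq | h
        · exfalso
          have := hinv R (le_refl R) hRn
          rw [heq] at hPr
          omega
        · exact h
      have hrn : r < xs.length := lt_of_lt_of_le hrR hRn
      rw [← hS1, pvInner_stop xs L (pvS xs (L + 1)) r (by omega) R hle2 hRn hPr.1 hmax]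
      rw [if_pos (by simpa using hrn)]
      have hgdr : xs.getD r 0 = xs[r] := List.getD_eq_getElem xs 0 hrn
      have hBc : pvT xs r - xs.getD r 0 = pvT xs (r + 1) := by
        have h := pvT_succ xs r hrn
        rw [hgdr]
        omega
      -- invariants for the next round
      have hL1n : L + 1 < xs.length := by omega
      have hx1 : 0 ≤ xs[L + 1] := by
        by_contra hneg
        have := pv_neg_tail xs hs (L + 1) hL1n (by omega) r (by omega)
        omega
      have hS2 : pvS xs (L + 1 + 1) = pvS xs (L + 1) + xs[L + 1] := pvS_succ xs (L + 1) hL1n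
      have hpos' : 0 < pvS xs (L + 1 + 1) := by omega
      have hinv' : ∀ j, r + 1 ≤ j → j ≤ xs.length → pvT xs j < pvS xs (L + 1 + 1) := by
        intro j hj1 hj2
        by_cases hjR : j ≤ R
        · have := hmax j (by omega) hjR
          omega
        · have := hinv j (by omega) hj2
          omega
      rw [hBc, htk]
      have hrec := ih (L + 1) (r + 1) (by omega) (by omega) (by omega) hpos' hinv'
      rw [hrec]
      rw [if_neg (by omega : ¬ pvS xs (L + 1) > xs.sum - pvS xs (L + 1))]

-- ===== VERDICT (by name: the statement is the Claim_ definition above) =====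
theorem pvS_one_pos (xs : List Int) (m : Int) (t : List Int) (hxs : xs = m :: t)
    (hm : 0 < m) : 0 < pvS xs 1 := by
  subst hxs
  simpa [pvS] using hm

theorem minimalHeaviestSetA_spec : Claim_equal_minimalHeaviestSetA := by
  intro arr _hDom hPre
  unfold Spec_minimalHeaviestSetA minimalHeaviestSetA minimalHeaviestSetA_alt
  rcases hPre with rfl | ⟨x, hx, hxpos⟩
  · decide
  · dsimp only
    have hs : (PySem.List.sorted arr (fun x => x) true).Pairwise (fun a b : Int => b ≤ a) :=
      PySem.List.sorted_pairwise_rev arr (fun x => x)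
    set xs := PySem.List.sorted arr (fun x => x) true with hxsdef
    have hmem : x ∈ xs := (PySem.List.mem_sorted arr (fun x => x) true x).mpr hx
    have hne : xs ≠ [] := List.ne_nil_of_mem hmem
    obtain ⟨m, t, hcons⟩ := List.exists_cons_of_ne_nil hne
    have hm : 0 < m := lt_of_lt_of_le hxpos
      (PySem.List.key_head_sorted_rev_ge arr (fun x => x) (hxsdef.symm.trans hcons) x hx)
    have hpos : 0 < pvS xs 1 := pvS_one_pos xs m t hcons hm
    have hlen : 0 < xs.length := by rw [hcons]; simp
    have hTn : pvT xs xs.length = 0 := by simp [pvT]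
    have hinv : ∀ j, xs.length ≤ j → j ≤ xs.length → pvT xs j < pvS xs (0 + 1) := by
      intro j hj1 hj2
      have : j = xs.length := le_antisymm hj2 hj1
      rw [this, hTn]
      simpa using hpos
    have h := pvOuter_eq xs hs (xs.length + 1) 0 xs.length hlen (le_refl _) (by omega)
      (by simpa using hpos) hinv
    have hS0 : pvS xs 0 = 0 := rfl
    have htake0 : xs.take 0 = [] := rfl
    have hdrop0 : xs.drop 0 = xs := rfl
    rw [hS0, htake0, hdrop0, hTn] at h
    exact h
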